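-- pv_equiv track=rewrite | github.com/aghie/head-qa | eval.py | netas_score
-- ===== SOURCE A (Python) =====
-- def netas_score(gold, predicted, avg_10best_scores=574.7):
--
--     right = 0
--     wrong = 0
--     unanswered = 0
--     brutas_score = 0
--     if len(gold) != len(predicted):
--         raise ValueError("The gold and predicted vector must have the same length")
--     else:
--         for g, p in zip(gold, predicted):
--        #     print (g,p, type(g), type(p))
--             if g == p:
--                 right+=1
--                 brutas_score+=3
--             elif p != 0:
--                 brutas_score-=1
--                 wrong+=1
--             else:
--                 unanswered+=1
--     return brutas_score, right, wrong, unanswered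
-- ===== SOURCE B (Python) =====
-- def netas_score(gold, predicted, avg_10best_scores=574.7):
--     if len(gold) != len(predicted):
--         raise ValueError("The gold and predicted vector must have the same length")
--     right = sum(1 for g, p in zip(gold, predicted) if g == p)
--     wrong = sum(1 for g, p in zip(gold, predicted) if g != p and p != 0)
--     unanswered = len(gold) - right - wrong
--     return 3 * right - wrong, right, wrong, unanswered
-- ===== Notes on version B (the rewrite author's own statement) =====
-- stated objective: alternative
-- what changed: Replaces the single loop that interleaves four running accumulators with two predicate counts over the zipped lists, deriving unanswered by subtraction and the score by the closed form 3*right - wrong.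
import Mathlib
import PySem

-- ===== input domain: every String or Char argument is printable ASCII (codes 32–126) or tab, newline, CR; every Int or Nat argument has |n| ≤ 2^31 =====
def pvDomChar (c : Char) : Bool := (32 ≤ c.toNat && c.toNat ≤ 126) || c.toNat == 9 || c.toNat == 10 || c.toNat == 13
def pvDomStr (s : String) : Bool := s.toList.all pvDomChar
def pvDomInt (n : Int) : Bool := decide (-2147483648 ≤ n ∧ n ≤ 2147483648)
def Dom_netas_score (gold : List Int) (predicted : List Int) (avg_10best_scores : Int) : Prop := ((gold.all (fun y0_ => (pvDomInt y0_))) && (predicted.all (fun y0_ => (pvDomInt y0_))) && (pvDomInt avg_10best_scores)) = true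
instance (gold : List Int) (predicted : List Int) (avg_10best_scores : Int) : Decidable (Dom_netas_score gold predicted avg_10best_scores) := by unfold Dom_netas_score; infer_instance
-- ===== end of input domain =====

-- B replaces the interleaved four-accumulator loop with two predicate counts,
-- deriving unanswered by subtraction and the score by the closed form 3*right - wrong (alternative decomposition, same cost).

-- ===== PORT A =====
-- A's single loop over zip(gold, predicted), updating (right, wrong, unanswered, brutas_score) in place.
def netas_score (gold : List Int) (predicted : List Int) (avg_10best_scores : Int) : Int × Int × Int × Int :=
  if gold.length ≠ predicted.length then (0, 0, 0, 0)  -- Python raises ValueError here; excluded by Pre_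
  else
    let st := (gold.zip predicted).foldl
      (fun (s : Int × Int × Int × Int) gp =>
        if gp.1 = gp.2 then (s.1 + 1, s.2.1, s.2.2.1, s.2.2.2 + 3)
        else if gp.2 ≠ 0 then (s.1, s.2.1 + 1, s.2.2.1, s.2.2.2 - 1)
        else (s.1, s.2.1, s.2.2.1 + 1, s.2.2.2))
      (0, 0, 0, 0)
    (st.2.2.2, st.1, st.2.1, st.2.2.1)

-- ===== PORT B =====
def netas_score_alt (gold : List Int) (predicted : List Int) (avg_10best_scores : Int) : Int × Int × Int × Int :=
  if gold.length ≠ predicted.length then (0, 0, 0, 0)  -- Python raises ValueError here; excluded by Pre_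
  else
    let z := gold.zip predicted
    let right : Int := (z.filter (fun gp => gp.1 == gp.2)).length
    let wrong : Int := (z.filter (fun gp => gp.1 != gp.2 && gp.2 != 0)).length
    let unanswered : Int := (gold.length : Int) - right - wrong
    (3 * right - wrong, right, wrong, unanswered)

-- ===== PRECONDITION & SPEC =====
-- Pre_ excludes exactly the inputs of unequal length, on which Python A raises ValueError.
def Pre_netas_score (gold : List Int) (predicted : List Int) (avg_10best_scores : Int) : Prop :=
  gold.length = predicted.length
instance (gold : List Int) (predicted : List Int) (avg_10best_scores : Int) : Decidable (Pre_netas_score gold predicted avg_10best_scores) := by unfold Pre_netas_score; infer_instance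
def pvWitness_netas_score : List Int × List Int × Int := ([1, 2, 0, 3], [1, 3, 0, 0], 574)

def Spec_netas_score (gold : List Int) (predicted : List Int) (avg_10best_scores : Int) (out : Int × Int × Int × Int) : Prop := out = netas_score_alt gold predicted avg_10best_scores
instance (gold : List Int) (predicted : List Int) (avg_10best_scores : Int) (out : Int × Int × Int × Int) : Decidable (Spec_netas_score gold predicted avg_10best_scores out) := by unfold Spec_netas_score; infer_instance

-- ===== CLAIM (what is proved, stated in full; the proofs are below) =====
def Claim_equal_netas_score : Prop := ∀ (gold : List Int) (predicted : List Int) (avg_10best_scores : Int), Dom_netas_score gold predicted avg_10best_scores → Pre_netas_score gold predicted avg_10best_scores → Spec_netas_score gold predicted avg_10best_scores (netas_score gold predicted avg_10best_scores)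

-- ===== LEMMAS AND PROOFS =====

-- A's fold, characterised by B's two filter counts (unanswered = rest of the list).
theorem netas_fold_eq (z : List (Int × Int)) (r w u b : Int) :
    z.foldl
      (fun (s : Int × Int × Int × Int) gp =>
        if gp.1 = gp.2 then (s.1 + 1, s.2.1, s.2.2.1, s.2.2.2 + 3)
        else if gp.2 ≠ 0 then (s.1, s.2.1 + 1, s.2.2.1, s.2.2.2 - 1)
        else (s.1, s.2.1, s.2.2.1 + 1, s.2.2.2))
      (r, w, u, b)
    = (r + ((z.filter (fun gp => gp.1 == gp.2)).length : Int),
       w + ((z.filter (fun gp => gp.1 != gp.2 && gp.2 != 0)).length : Int),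
       u + ((z.length : Int) - (z.filter (fun gp => gp.1 == gp.2)).length
            - (z.filter (fun gp => gp.1 != gp.2 && gp.2 != 0)).length),
       b + 3 * ((z.filter (fun gp => gp.1 == gp.2)).length : Int)
         - (z.filter (fun gp => gp.1 != gp.2 && gp.2 != 0)).length) := by
  induction z generalizing r w u b with
  | nil => simp
  | cons hd tl ih =>
    rw [List.foldl_cons]
    by_cases h1 : hd.1 = hd.2
    · rw [if_pos h1, ih]
      simp only [List.filter_cons, List.length_cons, h1, Prod.ext_iff]
      simp
      omega
    · by_cases h2 : hd.2 ≠ 0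
      · rw [if_neg h1, if_pos h2, ih]
        simp only [List.filter_cons, List.length_cons, Prod.ext_iff]
        simp [h1, h2]
        omega
      · rw [if_neg h1, if_neg h2, ih]
        have h0 : hd.2 = 0 := not_not.mp h2
        have h1' : ¬ hd.1 = (0 : Int) := h0 ▸ h1
        simp only [List.filter_cons, List.length_cons, Prod.ext_iff]
        simp [h0, h1']
        omega

-- ===== VERDICT (by name: the statement is the Claim_ definition above) =====
theorem netas_score_spec : Claim_equal_netas_score := by
  intro gold predicted avg hdom hpre
  have hlen : ¬ gold.length ≠ predicted.length := fun h => h hpre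
  show netas_score gold predicted avg = netas_score_alt gold predicted avg
  unfold netas_score netas_score_alt
  rw [if_neg hlen, if_neg hlen]
  have hz : ((gold.zip predicted).length : Int) = (gold.length : Int) := by
    have := hpre
    simp [List.length_zip]
    omega
  simp only [netas_fold_eq, hz, Prod.ext_iff]
  exact ⟨by ring, by ring, by ring, by ring⟩
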